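-- pv_equiv track=rewrite | github.com/Vlad88-hub/EGE2026 | task-25/18032.py | f
-- ===== SOURCE A (Python) =====
-- def f(num):
--     d = set()
--     for i in range(1, int(num ** .5) + 1):
--         if num % i == 0:
--             d |= {i, num // i}
--     S = 0
--     for n in d:
--         S += n
--     if S % 100 == 23:
--         return S
--     return 0
-- ===== SOURCE B (Python) =====
-- def f(num):
--     if num == 0:
--         return 0
--     S = 1
--     m = num
--     p = 2
--     while p * p <= m:
--         if m % p == 0:
--             t = 1
--             while m % p == 0:
--                 m = m // p
--                 t = t * p + 1
--             S = S * t
--         p = p + 1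
--     if m > 1:
--         S = S * (m + 1)
--     return S if S % 100 == 23 else 0
-- ===== Notes on version B (the rewrite author's own statement) =====
-- stated objective: alternative
-- what changed: B computes the divisor sum by prime factorization, trial-dividing out each prime p up to sqrt(m) and multiplying the geometric factors 1+p+...+p^k, instead of A's enumeration of divisor pairs i, num//i collected in a set and summed.
import Mathlib
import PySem

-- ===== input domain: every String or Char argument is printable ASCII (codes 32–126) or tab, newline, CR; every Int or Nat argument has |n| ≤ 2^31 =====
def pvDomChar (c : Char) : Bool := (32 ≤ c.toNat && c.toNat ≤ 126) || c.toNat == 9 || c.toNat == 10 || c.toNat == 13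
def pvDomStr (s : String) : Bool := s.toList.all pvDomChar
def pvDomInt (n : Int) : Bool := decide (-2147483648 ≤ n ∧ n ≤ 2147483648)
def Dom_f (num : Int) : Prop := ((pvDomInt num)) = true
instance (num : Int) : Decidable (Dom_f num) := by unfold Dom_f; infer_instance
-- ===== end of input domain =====

-- B computes the divisor sum by prime factorization (product of the geometric factors 1+p+...+p^k) instead of A's set of divisor pairs; different algorithm, similar cost.

-- ===== PORT A =====
-- int(num ** .5) is ported as Nat.sqrt num.toNat: exact for 0 ≤ num ≤ 2^31 (verified against CPython's float pow)
def f (num : Int) : Int :=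
  let r : Int := (Nat.sqrt num.toNat : Int)
  let d : PySem.Set Int :=
    (PySem.List.pyRange 1 (r + 1) 1).foldl
      (fun d i =>
        if PySem.Int.mod num i == 0 then
          PySem.Set.add (PySem.Set.add d i) (PySem.Int.floordiv num i)
        else d)
      PySem.Set.empty
  let S : Int := d.foldl (fun S n => S + n) 0
  if PySem.Int.mod S 100 == 23 then S else 0

-- ===== PORT B =====
-- the inner 'while m % p == 0' loop of Source B, dividing p out of m while building t = 1+p+...+p^k.
-- Ported with a fuel argument (m.toNat at the call site, enough for every iteration) as the
-- structural-recursion guard that makes the loop total; each step is Source B's loop body verbatim.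
def innerB : Nat → Int → Int → Int → Int × Int
  | 0, _, m, t => (m, t)
  | fuel + 1, p, m, t =>
    if 2 ≤ p ∧ 1 ≤ m ∧ PySem.Int.mod m p = 0 then
      innerB fuel p (PySem.Int.floordiv m p) (t * p + 1)
    else (m, t)

-- the outer 'while p * p <= m' loop of Source B (same fuel guard); returns the final (m, S)
def outerB : Nat → Int → Int → Int → Int × Int
  | 0, _, m, S => (m, S)
  | fuel + 1, p, m, S =>
    if 2 ≤ p ∧ p * p ≤ m then
      if PySem.Int.mod m p == 0 then
        outerB fuel (p + 1) (innerB m.toNat p m 1).1 (S * (innerB m.toNat p m 1).2)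
      else outerB fuel (p + 1) m S
    else (m, S)

def f_alt (num : Int) : Int :=
  if num == 0 then 0
  else
    let r := outerB num.toNat 2 num 1
    let S : Int := if r.1 > 1 then r.2 * (r.1 + 1) else r.2
    if PySem.Int.mod S 100 == 23 then S else 0

-- ===== PRECONDITION & SPEC =====
-- Pre_ excludes negative num, on which A raises TypeError (int() of the complex num ** 0.5).
def Pre_f (num : Int) : Prop := 0 ≤ num
instance (num : Int) : Decidable (Pre_f num) := by unfold Pre_f; infer_instance
def pvWitness_f : Int := 12

def Spec_f (num : Int) (out : Int) : Prop := out = f_alt num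
instance (num : Int) (out : Int) : Decidable (Spec_f num out) := by unfold Spec_f; infer_instance

-- ===== CLAIM (what is proved, stated in full; the proofs are below) =====
def Claim_equal_f : Prop := ∀ (num : Int), Dom_f num → Pre_f num → Spec_f num (f num)

-- ===== LEMMAS AND PROOFS =====

-- ---- A side: the set A builds holds exactly the divisors of num in [1, num] ----

theorem mem_pair_fold (p : Int → Bool) (g : Int → Int) (l : List Int)
    (d0 : PySem.Set Int) (x : Int) :
    x ∈ l.foldl (fun d i => if p i then PySem.Set.add (PySem.Set.add d i) (g i) else d) d0 ↔
      x ∈ d0 ∨ ∃ i ∈ l, p i ∧ (x = i ∨ x = g i) := by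
  induction l generalizing d0 with
  | nil => simp
  | cons a t ih =>
    simp only [List.foldl_cons, ih]
    by_cases hp : p a = true
    · simp [hp, PySem.Set.mem_add, or_assoc]
    · simp [hp]

theorem nodup_pair_fold (p : Int → Bool) (g : Int → Int) (l : List Int)
    (d0 : PySem.Set Int) (h0 : d0.Nodup) :
    (l.foldl (fun d i => if p i then PySem.Set.add (PySem.Set.add d i) (g i) else d) d0).Nodup := by
  induction l generalizing d0 with
  | nil => exact h0
  | cons a t ih =>
    simp only [List.foldl_cons]
    by_cases hp : p a
    · simp only [hp, if_pos]
      exact ih _ (PySem.Set.nodup_add _ _ (PySem.Set.nodup_add _ _ h0))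
    · simp only [hp]
      exact ih _ (by simpa [hp] using h0)

-- Nat divisor pairing: every divisor k of m is i or m / i for some i ≤ √m
theorem nat_div_pair (m k : Nat) (hm : 1 ≤ m) (hk1 : 1 ≤ k) (hdvd : k ∣ m) :
    ∃ i : Nat, 1 ≤ i ∧ i ≤ Nat.sqrt m ∧ i ∣ m ∧ (k = i ∨ k = m / i) := by
  by_cases hle : k ≤ Nat.sqrt m
  · exact ⟨k, hk1, hle, hdvd, Or.inl rfl⟩
  · have hkm : k ≤ m := Nat.le_of_dvd hm hdvd
    have hkpos : 0 < k := hk1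
    have hlt : m < k * k := by
      have h2 := Nat.sqrt_lt'.mp (Nat.lt_of_not_le hle)
      rw [pow_two] at h2; exact h2
    have hdivlt : m / k < k := (Nat.div_lt_iff_lt_mul hkpos).mpr hlt
    have hdiv1 : 1 ≤ m / k := (Nat.one_le_div_iff hkpos).mpr hkm
    refine ⟨m / k, hdiv1, ?_, ⟨k, (Nat.div_mul_cancel hdvd).symm⟩, Or.inr ?_⟩
    · apply Nat.le_sqrt.mpr
      calc m / k * (m / k) ≤ m / k * k :=
            Nat.mul_le_mul_left _ (Nat.le_of_lt hdivlt)
        _ ≤ m := Nat.div_mul_le_self m k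
    · exact (Nat.div_div_self hdvd (by omega)).symm

-- the elements of A's set are exactly the divisors of num in [1, num]
theorem mem_d_iff (num x : Int) (hn : 0 ≤ num) :
    (x ∈ (PySem.List.pyRange 1 ((Nat.sqrt num.toNat : Int) + 1) 1).foldl
      (fun d i =>
        if PySem.Int.mod num i == 0 then
          PySem.Set.add (PySem.Set.add d i) (PySem.Int.floordiv num i)
        else d)
      PySem.Set.empty) ↔ (1 ≤ x ∧ x ≤ num ∧ x ∣ num) := by
  rw [mem_pair_fold]
  simp only [PySem.Set.empty, List.not_mem_nil, false_or, PySem.List.mem_pyRange_one,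
    beq_iff_eq, PySem.Int.mod_eq_zero_iff_dvd]
  constructor
  · rintro ⟨i, ⟨hi1, hi2⟩, hdvd, (rfl | rfl)⟩
    · have hsqm : (Nat.sqrt num.toNat : Int) ≤ num := by
        have := Nat.sqrt_le_self num.toNat
        omega
      exact ⟨hi1, by omega, hdvd⟩
    · have hipos : 0 < i := hi1
      rw [PySem.Int.floordiv_eq_ediv_of_pos hipos]
      have hnum1 : 1 ≤ num := by
        have := Nat.sqrt_le_self num.toNat
        omega
      refine ⟨?_, Int.ediv_le_self i hn, ⟨i, (Int.ediv_mul_cancel hdvd).symm⟩⟩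
      have : 1 * i ≤ num := by
        have := Int.le_of_dvd (by omega) hdvd
        omega
      exact Int.le_ediv_iff_mul_le hipos |>.mpr this
  · rintro ⟨hx1, hx2, hdvd⟩
    have hm : 1 ≤ num.toNat := by omega
    have hk1 : 1 ≤ x.toNat := by omega
    have hxcast : x = (x.toNat : Int) := by omega
    have hncast : num = (num.toNat : Int) := by omega
    have hdvdN : x.toNat ∣ num.toNat := by
      rwa [hxcast, hncast, Int.natCast_dvd_natCast] at hdvd
    obtain ⟨i, hi1, hi2, hidvd, hcase⟩ := nat_div_pair num.toNat x.toNat hm hk1 hdvdN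
    refine ⟨(i : Int), ⟨by exact_mod_cast hi1, by omega⟩, ?_, ?_⟩
    · rw [hncast, Int.natCast_dvd_natCast]; exact hidvd
    · rcases hcase with h | h
      · left; omega
      · right
        rw [PySem.Int.floordiv_eq_ediv_of_pos (by exact_mod_cast hi1), hncast,
          ← Int.natCast_div]
        omega

-- ---- B side: Nat mirror of the two loops ----

def innerN (p m t : Nat) : Nat × Nat :=
  if h : 2 ≤ p ∧ 1 ≤ m ∧ m % p = 0 then innerN p (m / p) (t * p + 1) else (m, t)
termination_by m
decreasing_by exact Nat.div_lt_self (by omega) (by omega)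

theorem innerN_fst_le : ∀ (n p m t : Nat), m ≤ n → (innerN p m t).1 ≤ m := by
  intro n
  induction n with
  | zero =>
    intro p m t hn
    rw [innerN]
    split
    · omega
    · simp
  | succ n ih =>
    intro p m t hn
    rw [innerN]
    split
    · rename_i hc
      have h1 : m / p < m := Nat.div_lt_self (by omega) (by omega)
      have := ih p (m / p) (t * p + 1) (by omega)
      omega
    · simp

def outerN (p m S : Nat) : Nat × Nat :=
  if h : 2 ≤ p ∧ p * p ≤ m then
    if m % p = 0 then
      outerN (p + 1) (innerN p m 1).1 (S * (innerN p m 1).2)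
    else outerN (p + 1) m S
  else (m, S)
termination_by m + 1 - p
decreasing_by
  · have hpm : p ≤ m := le_trans (Nat.le_mul_of_pos_left p (by omega)) h.2
    have hle := innerN_fst_le m p m 1 le_rfl
    omega
  · have hpm : p ≤ m := le_trans (Nat.le_mul_of_pos_left p (by omega)) h.2
    omega

-- ---- bridge: the Int loops compute the casts of the Nat loops ----

theorem cast_mod_pysem (m p : Nat) (hp : 0 < p) :
    PySem.Int.mod (m : Int) (p : Int) = ((m % p : Nat) : Int) := by
  rw [PySem.Int.mod_eq_emod_of_pos (by exact_mod_cast hp)]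
  exact (Int.natCast_mod m p).symm

theorem cast_div_pysem (m p : Nat) (hp : 0 < p) :
    PySem.Int.floordiv (m : Int) (p : Int) = ((m / p : Nat) : Int) := by
  rw [PySem.Int.floordiv_eq_ediv_of_pos (by exact_mod_cast hp)]
  exact (Int.natCast_div m p).symm

theorem innerB_cast : ∀ (fuel p m t : Nat), 2 ≤ p → m ≤ fuel →
    innerB fuel (p : Int) (m : Int) (t : Int) = (((innerN p m t).1 : Int), ((innerN p m t).2 : Int)) := by
  intro fuel
  induction fuel with
  | zero =>
    intro p m t hp hn
    have hm0 : m = 0 := by omega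
    subst hm0
    rw [innerN, dif_neg (by omega)]
    rfl
  | succ n ih =>
    intro p m t hp hn
    by_cases hc : 1 ≤ m ∧ m % p = 0
    · have hmodc := cast_mod_pysem m p (by omega)
      have hInt : (2:Int) ≤ (p:Int) ∧ (1:Int) ≤ (m:Int) ∧ PySem.Int.mod (m:Int) (p:Int) = 0 := by
        refine ⟨by exact_mod_cast hp, by exact_mod_cast hc.1, ?_⟩
        rw [hmodc, hc.2]
        simp
      rw [innerB, innerN, if_pos hInt, dif_pos ⟨hp, hc.1, hc.2⟩]
      rw [cast_div_pysem m p (by omega)]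
      have h1 : m / p < m := Nat.div_lt_self (by omega) (by omega)
      have hrec := ih p (m / p) (t * p + 1) hp (by omega)
      rw [show ((t : Int) * (p : Int) + 1) = ((t * p + 1 : Nat) : Int) by push_cast; ring]
      exact hrec
    · have hIntNot : ¬ ((2:Int) ≤ (p:Int) ∧ (1:Int) ≤ (m:Int) ∧ PySem.Int.mod (m:Int) (p:Int) = 0) := by
        rintro ⟨-, hm1, hmod⟩
        rw [cast_mod_pysem m p (by omega)] at hmod
        exact hc ⟨by exact_mod_cast hm1, by exact_mod_cast hmod⟩
      have hNatNot : ¬ (2 ≤ p ∧ 1 ≤ m ∧ m % p = 0) := by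
        rintro ⟨-, h1, h2⟩
        exact hc ⟨h1, h2⟩
      rw [innerB, innerN, if_neg hIntNot, dif_neg hNatNot]

theorem outerB_cast : ∀ (fuel p m S : Nat), 2 ≤ p → m + 1 - p ≤ fuel →
    outerB fuel (p : Int) (m : Int) (S : Int) = (((outerN p m S).1 : Int), ((outerN p m S).2 : Int)) := by
  intro fuel
  induction fuel with
  | zero =>
    intro p m S hp hn
    have hgt : ¬ (p * p ≤ m) := by
      intro h
      have := le_trans (Nat.le_mul_of_pos_left p (by omega)) h
      omega
    rw [outerN, dif_neg (fun h => hgt h.2)]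
    rfl
  | succ n ih =>
    intro p m S hp hn
    by_cases hg : p * p ≤ m
    · have hpm : p ≤ m := le_trans (Nat.le_mul_of_pos_left p (by omega)) hg
      have hInt : (2:Int) ≤ (p:Int) ∧ (p:Int) * (p:Int) ≤ (m:Int) :=
        ⟨by exact_mod_cast hp, by exact_mod_cast hg⟩
      rw [outerB, outerN, if_pos hInt, dif_pos ⟨hp, hg⟩]
      have hmodc := cast_mod_pysem m p (by omega)
      by_cases hmod : m % p = 0
      · have hbt : (PySem.Int.mod (m:Int) (p:Int) == 0) = true := by
          rw [hmodc, hmod]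
          simp
        rw [if_pos hmod, if_pos hbt]
        have hib : innerB ((m : Int)).toNat (p:Int) (m:Int) (1:Int)
            = (((innerN p m 1).1 : Int), ((innerN p m 1).2 : Int)) := by
          rw [Int.toNat_natCast]
          have := innerB_cast m p m 1 hp le_rfl
          simpa using this
        rw [hib]
        have hle := innerN_fst_le m p m 1 le_rfl
        have hrec := ih (p + 1) (innerN p m 1).1 (S * (innerN p m 1).2) (by omega) (by omega)
        rw [show (((p + 1 : Nat)) : Int) = (p : Int) + 1 by push_cast; ring,
          show ((S * (innerN p m 1).2 : Nat) : Int) = (S : Int) * ((innerN p m 1).2 : Int) by push_cast; ring] at hrec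
        exact hrec
      · have hbf : ¬ ((PySem.Int.mod (m:Int) (p:Int) == 0) = true) := by
          rw [hmodc]
          simp only [beq_iff_eq, Int.natCast_eq_zero]
          exact hmod
        rw [if_neg hmod, if_neg hbf]
        have hrec := ih (p + 1) m S (by omega) (by omega)
        rw [show (((p + 1 : Nat)) : Int) = (p : Int) + 1 by push_cast; ring] at hrec
        exact hrec
    · have hIntNot : ¬ ((2:Int) ≤ (p:Int) ∧ (p:Int) * (p:Int) ≤ (m:Int)) := by
        rintro ⟨-, hpp⟩
        exact hg (by exact_mod_cast hpp)
      have hNatNot : ¬ (2 ≤ p ∧ p * p ≤ m) := fun h => hg h.2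
      rw [outerB, outerN, if_neg hIntNot, dif_neg hNatNot]

-- ---- number theory: outerN computes the divisor sum ----

theorem innerN_pow (p : Nat) (hp : 2 ≤ p) :
    ∀ (k m' t : Nat), ¬ p ∣ m' → 1 ≤ m' →
      innerN p (p ^ k * m') t = (m', t * p ^ k + ∑ i ∈ Finset.range k, p ^ i) := by
  intro k
  induction k with
  | zero =>
    intro m' t hnd hm'
    rw [innerN, dif_neg]
    · simp
    · rintro ⟨-, -, hmod⟩
      rw [pow_zero, one_mul] at hmod
      exact hnd (Nat.dvd_of_mod_eq_zero hmod)
  | succ k ih =>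
    intro m' t hnd hm'
    rw [innerN, dif_pos ?pos]
    case pos =>
      refine ⟨hp, ?_, ?_⟩
      · have h1 : 1 ≤ p ^ (k + 1) := Nat.one_le_pow _ _ (by omega)
        exact Nat.one_le_iff_ne_zero.mpr (by positivity)
      · have : p ∣ p ^ (k + 1) * m' :=
          Dvd.dvd.mul_right (dvd_pow_self p (Nat.succ_ne_zero k)) m'
        omega
    have hdiv : p ^ (k + 1) * m' / p = p ^ k * m' := by
      rw [pow_succ, show p ^ k * p * m' = p * (p ^ k * m') by ring]
      exact Nat.mul_div_cancel_left _ (by omega)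
    rw [hdiv, ih m' (t * p + 1) hnd hm']
    rw [Prod.mk.injEq]
    refine ⟨rfl, ?_⟩
    rw [Finset.sum_range_succ]
    ring

-- a number < p² all of whose prime factors are ≥ p is 1 or prime
theorem small_case (p m : Nat) (hm : 1 ≤ m) (hlt : m < p * p)
    (hmin : ∀ q, q.Prime → q ∣ m → p ≤ q) : m = 1 ∨ m.Prime := by
  by_cases h1 : m = 1
  · exact Or.inl h1
  right
  by_contra hnp
  have hq := Nat.minFac_prime h1
  have hqd := Nat.minFac_dvd m
  have hpq : p ≤ m.minFac := hmin _ hq hqd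
  have hco : m / m.minFac ≠ 1 := by
    intro h
    have h2 := Nat.div_mul_cancel hqd
    rw [h, one_mul] at h2
    exact hnp (h2 ▸ hq)
  have hdp : 0 < m / m.minFac := Nat.div_pos (Nat.minFac_le (by omega)) (Nat.minFac_pos m)
  have hq2 := Nat.minFac_prime hco
  have hq2d : (m / m.minFac).minFac ∣ m := (Nat.minFac_dvd _).trans (Nat.div_dvd_of_dvd hqd)
  have hpq2 : p ≤ (m / m.minFac).minFac := hmin _ hq2 hq2d
  have hge : p ≤ m / m.minFac := le_trans hpq2 (Nat.minFac_le hdp)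
  have hmm : m.minFac * (m / m.minFac) = m := Nat.mul_div_cancel' hqd
  nlinarith

def finN (r : Nat × Nat) : Nat := if 1 < r.1 then r.2 * (r.1 + 1) else r.2

def sdiv (n : Nat) : Nat := ∑ d ∈ n.divisors, d

theorem sdiv_one : sdiv 1 = 1 := by simp [sdiv]

theorem sdiv_prime (p : Nat) (hp : p.Prime) : sdiv p = p + 1 := by
  unfold sdiv
  rw [hp.divisors, Finset.sum_pair (show (1:ℕ) ≠ p from hp.one_lt.ne)]
  omega

theorem sdiv_prime_pow (p k : Nat) (hp : p.Prime) :
    sdiv (p ^ k) = ∑ i ∈ Finset.range (k + 1), p ^ i := by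
  unfold sdiv
  exact Nat.sum_divisors_prime_pow hp

theorem small_finish (p m S : Nat) (hm : 1 ≤ m) (hlt : m < p * p)
    (hmin : ∀ q, q.Prime → q ∣ m → p ≤ q) : finN (m, S) = S * sdiv m := by
  rcases small_case p m hm hlt hmin with h1 | hpr
  · subst h1
    simp [finN, sdiv_one]
  · have h2 := hpr.one_lt
    simp only [finN, h2, if_pos, sdiv_prime m hpr]
    try ring

theorem outerN_spec : ∀ (N p m S : Nat), m + 1 - p ≤ N → 2 ≤ p → 1 ≤ m →
    (∀ q, q.Prime → q ∣ m → p ≤ q) → finN (outerN p m S) = S * sdiv m := by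
  intro N
  induction N with
  | zero =>
    intro p m S hN hp hm hmin
    have hpp : p ≤ p * p := Nat.le_mul_of_pos_left p (by omega)
    rw [outerN, dif_neg (by rintro ⟨-, h⟩; omega)]
    exact small_finish p m S hm (by omega) hmin
  | succ N ih =>
    intro p m S hN hp hm hmin
    have hpp : p ≤ p * p := Nat.le_mul_of_pos_left p (by omega)
    rw [outerN]
    by_cases hg : p * p ≤ m
    · rw [dif_pos ⟨hp, hg⟩]
      have hpm : p ≤ m := le_trans hpp hg
      by_cases hmod : m % p = 0
      · rw [if_pos hmod]
        have hpd : p ∣ m := Nat.dvd_of_mod_eq_zero hmod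
        have hprime : p.Prime := by
          have h1 : p ≠ 1 := by omega
          have hq := Nat.minFac_prime h1
          have hle1 : p ≤ p.minFac := hmin _ hq ((Nat.minFac_dvd p).trans hpd)
          have hle2 : p.minFac ≤ p := Nat.minFac_le (by omega)
          have heqq : p.minFac = p := le_antisymm hle2 hle1
          rw [← heqq]; exact hq
        obtain ⟨k, m', hnd, heq⟩ := Nat.exists_eq_pow_mul_and_not_dvd (show m ≠ 0 by omega) p (by omega)
        have hm' : 1 ≤ m' := by
          rcases Nat.eq_zero_or_pos m' with h | h
          · rw [h, mul_zero] at heq; omega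
          · exact h
        have hk : 1 ≤ k := by
          by_contra hk0
          have hk00 : k = 0 := by omega
          rw [hk00, pow_zero, one_mul] at heq
          exact hnd (heq ▸ hpd)
        have hinner : innerN p m 1 = (m', ∑ i ∈ Finset.range (k + 1), p ^ i) := by
          rw [heq, innerN_pow p (by omega) k m' 1 hnd hm', Prod.mk.injEq]
          refine ⟨rfl, ?_⟩
          rw [Finset.sum_range_succ]
          ring
        simp only [hinner]
        have hm'lt : m' < m := by
          have hpk : p ≤ p ^ k := Nat.le_self_pow (by omega) p
          nlinarith
        have hmin' : ∀ q, q.Prime → q ∣ m' → p + 1 ≤ q := by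
          intro q hq hqd
          have hq1 : p ≤ q := hmin q hq (hqd.trans ⟨p ^ k, by rw [heq]; ring⟩)
          have hqne : q ≠ p := fun h => hnd (h ▸ hqd)
          omega
        rw [ih (p + 1) m' (S * ∑ i ∈ Finset.range (k + 1), p ^ i) (by omega) (by omega) hm' hmin']
        rw [heq]
        have hcop : (p ^ k).Coprime m' :=
          ((Nat.Prime.coprime_iff_not_dvd hprime).mpr hnd).pow_left _
        have hmul : sdiv (p ^ k * m') = sdiv (p ^ k) * sdiv m' := by
          unfold sdiv
          exact Nat.Coprime.sum_divisors_mul hcop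
        rw [hmul, sdiv_prime_pow p k hprime]
        ring
      · rw [if_neg hmod]
        have hmin' : ∀ q, q.Prime → q ∣ m → p + 1 ≤ q := by
          intro q hq hqd
          have hq1 := hmin q hq hqd
          have hqne : q ≠ p := by
            intro h
            subst h
            omega
          omega
        exact ih (p + 1) m S (by omega) (by omega) hm hmin'
    · rw [dif_neg (by rintro ⟨-, h⟩; exact hg h)]
      exact small_finish p m S hm (by omega) hmin

-- ---- assembly ----

theorem sum_d_eq (num : Int) (hn : 1 ≤ num) :
    ((PySem.List.pyRange 1 ((Nat.sqrt num.toNat : Int) + 1) 1).foldl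
      (fun d i =>
        if PySem.Int.mod num i == 0 then
          PySem.Set.add (PySem.Set.add d i) (PySem.Int.floordiv num i)
        else d)
      PySem.Set.empty).sum = ((sdiv num.toNat : Nat) : Int) := by
  set d := (PySem.List.pyRange 1 ((Nat.sqrt num.toNat : Int) + 1) 1).foldl
      (fun d i =>
        if PySem.Int.mod num i == 0 then
          PySem.Set.add (PySem.Set.add d i) (PySem.Int.floordiv num i)
        else d)
      PySem.Set.empty with hdDef
  have hnd : d.Nodup := nodup_pair_fold _ _ _ _ List.nodup_nil
  have hmem : ∀ x, x ∈ d ↔ (1 ≤ x ∧ x ≤ num ∧ x ∣ num) := fun x => by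
    rw [hdDef]; exact mem_d_iff num x (by omega)
  have hset : d.toFinset = num.toNat.divisors.map ⟨(Nat.cast : ℕ → ℤ), fun a b h => by exact_mod_cast h⟩ := by
    apply Finset.ext
    intro x
    rw [List.mem_toFinset, hmem, Finset.mem_map]
    simp only [Function.Embedding.coeFn_mk, Nat.mem_divisors]
    constructor
    · rintro ⟨hx1, hx2, hdvd⟩
      refine ⟨x.toNat, ⟨?_, by omega⟩, by omega⟩
      have hxc : x = (x.toNat : Int) := by omega
      have hnc : num = (num.toNat : Int) := by omega
      rwa [hxc, hnc, Int.natCast_dvd_natCast] at hdvd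
    · rintro ⟨a, ⟨had, hne⟩, rfl⟩
      have ha1 : 1 ≤ a := Nat.pos_of_dvd_of_pos had (by omega)
      have ha2 : a ≤ num.toNat := Nat.le_of_dvd (by omega) had
      refine ⟨by exact_mod_cast ha1, by omega, ?_⟩
      have h2 : (a : Int) ∣ (num.toNat : Int) := Int.natCast_dvd_natCast.mpr had
      rwa [Int.toNat_of_nonneg (by omega)] at h2
  calc d.sum = (d.map id).sum := by rw [List.map_id]
    _ = d.toFinset.sum id := (List.sum_toFinset _ hnd).symm
    _ = (num.toNat.divisors.map ⟨(Nat.cast : ℕ → ℤ), fun a b h => by exact_mod_cast h⟩).sum id := by rw [hset]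
    _ = ∑ a ∈ num.toNat.divisors, (a : Int) := Finset.sum_map _ _ _
    _ = ((sdiv num.toNat : Nat) : Int) := by unfold sdiv; push_cast; rfl

theorem f_eq_f_alt (num : Int) (hn : 0 ≤ num) : f num = f_alt num := by
  by_cases h0 : num = 0
  · subst h0
    decide
  · have h1 : 1 ≤ num := by omega
    set n : Nat := num.toNat with hnDef
    have hnc : num = (n : Int) := by omega
    have hA : f num = (if PySem.Int.mod ((sdiv n : Nat) : Int) 100 == 23 then ((sdiv n : Nat) : Int) else 0) := by
      have e0 : f num = (if PySem.Int.mod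
          ((((PySem.List.pyRange 1 ((Nat.sqrt num.toNat : Int) + 1) 1).foldl
            (fun d i =>
              if PySem.Int.mod num i == 0 then
                PySem.Set.add (PySem.Set.add d i) (PySem.Int.floordiv num i)
              else d)
            PySem.Set.empty).foldl (fun S n => S + n) 0)) 100 == 23 then
          (((PySem.List.pyRange 1 ((Nat.sqrt num.toNat : Int) + 1) 1).foldl
            (fun d i =>
              if PySem.Int.mod num i == 0 then
                PySem.Set.add (PySem.Set.add d i) (PySem.Int.floordiv num i)
              else d)
            PySem.Set.empty).foldl (fun S n => S + n) 0) else 0) := rfl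
      have hsum : (((PySem.List.pyRange 1 ((Nat.sqrt num.toNat : Int) + 1) 1).foldl
            (fun d i =>
              if PySem.Int.mod num i == 0 then
                PySem.Set.add (PySem.Set.add d i) (PySem.Int.floordiv num i)
              else d)
            PySem.Set.empty).foldl (fun S n => S + n) 0) = ((sdiv n : Nat) : Int) := by
        rw [← List.sum_eq_foldl]
        exact sum_d_eq num h1
      rw [e0, hsum]
    have hB : f_alt num = (if PySem.Int.mod ((sdiv n : Nat) : Int) 100 == 23 then ((sdiv n : Nat) : Int) else 0) := by
      have hnum0 : ¬ ((num == 0) = true) := by simpa using h0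
      have hob : outerB num.toNat 2 num 1 = (((outerN 2 n 1).1 : Int), ((outerN 2 n 1).2 : Int)) := by
        rw [hnc, Int.toNat_natCast, show ((2:Int)) = ((2:Nat) : Int) by rfl, show ((1:Int)) = ((1:Nat) : Int) by rfl]
        exact outerB_cast n 2 n 1 le_rfl (by omega)
      have hspec : finN (outerN 2 n 1) = sdiv n := by
        have hx := outerN_spec n 2 n 1 (by omega) le_rfl (by omega)
          (fun q hq _ => hq.two_le)
        rw [hx]
        ring
      have hS : (if ((outerN 2 n 1).1 : Int) > 1 then ((outerN 2 n 1).2 : Int) * (((outerN 2 n 1).1 : Int) + 1) else ((outerN 2 n 1).2 : Int)) = ((sdiv n : Nat) : Int) := by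
        rw [← hspec]
        unfold finN
        by_cases hgt : 1 < (outerN 2 n 1).1
        · rw [if_pos (by exact_mod_cast hgt), if_pos hgt]
          push_cast
          ring
        · rw [if_neg (by exact_mod_cast hgt), if_neg hgt]
      have e1 : f_alt num = (if PySem.Int.mod
          (if (outerB num.toNat 2 num 1).1 > 1 then (outerB num.toNat 2 num 1).2 * ((outerB num.toNat 2 num 1).1 + 1) else (outerB num.toNat 2 num 1).2) 100 == 23 then
          (if (outerB num.toNat 2 num 1).1 > 1 then (outerB num.toNat 2 num 1).2 * ((outerB num.toNat 2 num 1).1 + 1) else (outerB num.toNat 2 num 1).2) else 0) := by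
        unfold f_alt
        rw [if_neg hnum0]
      rw [e1, hob]
      show (if PySem.Int.mod
          (if ((outerN 2 n 1).1 : Int) > 1 then ((outerN 2 n 1).2 : Int) * (((outerN 2 n 1).1 : Int) + 1) else ((outerN 2 n 1).2 : Int)) 100 == 23 then
          (if ((outerN 2 n 1).1 : Int) > 1 then ((outerN 2 n 1).2 : Int) * (((outerN 2 n 1).1 : Int) + 1) else ((outerN 2 n 1).2 : Int)) else 0)
          = (if PySem.Int.mod ((sdiv n : Nat) : Int) 100 == 23 then ((sdiv n : Nat) : Int) else 0)
      rw [hS]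
    rw [hA, hB]

-- ===== VERDICT (by name: the statement is the Claim_ definition above) =====
theorem f_spec : Claim_equal_f := by
  intro num _ hpre
  unfold Spec_f
  exact f_eq_f_alt num hpre
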